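-- pv_equiv track=rewrite | github.com/quarrying/khandy | khandy/misc.py | get_sw_slices
-- ===== SOURCE A (Python) =====
-- from typing import List, Optional, Tuple, Union
--
-- def get_sw_slices(length: int, window_size: int, stride: Optional[int] = None,
--                   drop_last: bool = False, adjust_last: bool = True) -> List[Tuple[int, int]]:
--     """Generate a list of tuples representing sliding window slices of a sequence of given length.
--
--     Args:
--         length (int): The total length of the sequence to be sliced.
--         window_size (int): The size of each sliding window.
--         stride (Optional[int], optional): The step size (or stride) between the start of each window.
--             If None, it defaults to the window_size. Defaults to None.
--         drop_last (bool, optional): Whether to drop the last window if it is incomplete.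
--             Defaults to False.
--         adjust_last (bool, optional): Whether to adjust the start index of the last window
--             if it is incomplete and drop_last is False. This ensures the last window's size
--             equals the window_size if possible. Defaults to True.
--
--     Returns:
--         List[Tuple[int, int]]: A list of tuples, where each tuple (start, end) represents
--             a sliding window slice of the sequence. The end index is exclusive.
--
--     Raises:
--         TypeError: If `length`, `window_size`, or `stride` are not of the expected type.
--         ValueError: If `length`, `stride`, or `window_size` are zero or negative.
--     """
--     if not isinstance(length, int):
--         raise TypeError(f'`length` must be int, got {type(length)}')
--     if not isinstance(window_size, int):
--         raise TypeError(f'`window_size` must be int, got {type(window_size)}')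
--     if not isinstance(stride, int) and (stride is not None):
--         raise TypeError(f'`stride` must be int or None, got {type(stride)}')
--     if length <= 0:
--         raise ValueError(f'`length` cannot be zero or negative, got {length}')
--     if stride is not None and stride <= 0:
--         raise ValueError(f'`stride` cannot be zero or negative, got {stride}')
--     if window_size <= 0:
--         raise ValueError(f'`window_size` cannot be zero or negative, got {window_size}')
--
--     stride = stride or window_size
--
--     slices = []
--     max_index = min_index = 0
--     while max_index < length:
--         max_index = min_index + window_size
--         if max_index > length:
--             if not drop_last:
--                 max_index = length
--                 if adjust_last:
--                     min_index = max(0, max_index - window_size)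
--                 slices.append((min_index, max_index))
--         else:
--             slices.append((min_index, max_index))
--         min_index = min_index + stride
--     return slices
-- ===== SOURCE B (Python) =====
-- from typing import List, Optional, Tuple
--
-- def get_sw_slices(length: int, window_size: int, stride: Optional[int] = None,
--                   drop_last: bool = False, adjust_last: bool = True) -> List[Tuple[int, int]]:
--     if not isinstance(length, int):
--         raise TypeError(f'`length` must be int, got {type(length)}')
--     if not isinstance(window_size, int):
--         raise TypeError(f'`window_size` must be int, got {type(window_size)}')
--     if not isinstance(stride, int) and (stride is not None):
--         raise TypeError(f'`stride` must be int or None, got {type(stride)}')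
--     if length <= 0:
--         raise ValueError(f'`length` cannot be zero or negative, got {length}')
--     if stride is not None and stride <= 0:
--         raise ValueError(f'`stride` cannot be zero or negative, got {stride}')
--     if window_size <= 0:
--         raise ValueError(f'`window_size` cannot be zero or negative, got {window_size}')
--
--     stride = stride or window_size
--     # number of full windows strictly inside [0, length)
--     k = 0 if length <= window_size else -(-(length - window_size) // stride)
--     slices = [(i * stride, i * stride + window_size) for i in range(k)]
--     # the single boundary window starting at k*stride
--     start = k * stride
--     end = start + window_size
--     if end == length:
--         slices.append((start, end))
--     elif not drop_last:
--         slices.append((max(0, length - window_size) if adjust_last else start, length))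
--     return slices
-- ===== Notes on version B (the rewrite author's own statement) =====
-- stated objective: alternative
-- what changed: Replaces A's stateful while-loop (mutating min/max indices and appending one window per iteration) by a closed-form ceil-division count of the full windows, a comprehension producing them, and a single explicit boundary-window case analysis.
import Mathlib
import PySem

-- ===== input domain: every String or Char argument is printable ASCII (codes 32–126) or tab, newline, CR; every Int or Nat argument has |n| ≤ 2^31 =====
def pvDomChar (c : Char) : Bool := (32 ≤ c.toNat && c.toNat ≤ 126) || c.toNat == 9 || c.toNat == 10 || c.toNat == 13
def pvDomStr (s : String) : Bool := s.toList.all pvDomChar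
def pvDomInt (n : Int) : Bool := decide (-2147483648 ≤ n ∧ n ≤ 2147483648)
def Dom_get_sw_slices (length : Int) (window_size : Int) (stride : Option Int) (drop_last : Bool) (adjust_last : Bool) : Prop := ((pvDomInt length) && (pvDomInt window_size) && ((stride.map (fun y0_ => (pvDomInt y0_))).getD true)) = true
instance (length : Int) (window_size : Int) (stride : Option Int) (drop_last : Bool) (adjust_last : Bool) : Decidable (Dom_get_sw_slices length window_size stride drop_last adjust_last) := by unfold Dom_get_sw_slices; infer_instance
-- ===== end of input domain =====

-- B replaces A's stateful while-loop by a closed-form window count plus one boundary-window case analysis (objective: alternative).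

-- ===== PORT A =====
-- the while-loop of A; fuel only makes the recursion total (inside Pre_ the loop terminates within the fuel given below)
def aLoop (length window_size stride : Int) (drop_last adjust_last : Bool)
    (fuel : Nat) (slices : List (Int × Int)) (min_index max_index : Int) : List (Int × Int) :=
  match fuel with
  | 0 => slices
  | fuel + 1 =>
    if max_index < length then
      let max' := min_index + window_size
      if length < max' then
        if !drop_last then
          let max'' := length
          let min' := if adjust_last then max 0 (max'' - window_size) else min_index
          aLoop length window_size stride drop_last adjust_last fuel
            (slices ++ [(min', max'')]) (min' + stride) max''
        else
          aLoop length window_size stride drop_last adjust_last fuel slices (min_index + stride) max'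
      else
        aLoop length window_size stride drop_last adjust_last fuel
          (slices ++ [(min_index, max')]) (min_index + stride) max'
    else slices

def get_sw_slices (length : Int) (window_size : Int) (stride : Option Int) (drop_last : Bool) (adjust_last : Bool) : List (Int × Int) :=
  -- Python `stride = stride or window_size` (0 is falsy)
  let s := match stride with | none => window_size | some v => if v = 0 then window_size else v
  aLoop length window_size s drop_last adjust_last (length.toNat + 2) [] 0 0

-- ===== PORT B =====
def get_sw_slices_alt (length : Int) (window_size : Int) (stride : Option Int) (drop_last : Bool) (adjust_last : Bool) : List (Int × Int) :=
  let s := match stride with | none => window_size | some v => if v = 0 then window_size else v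
  -- k = 0 if length <= window_size else -(-(length - window_size) // stride)
  let k := if length ≤ window_size then 0 else -(PySem.Int.floordiv (-(length - window_size)) s)
  let slices := (PySem.List.pyRange 0 k 1).map (fun i => (i * s, i * s + window_size))
  let start := k * s
  let e := start + window_size
  if e = length then slices ++ [(start, e)]
  else if !drop_last then slices ++ [((if adjust_last then max 0 (length - window_size) else start), length)]
  else slices

-- ===== PRECONDITION & SPEC =====
-- exactly the inputs on which Python A returns (it raises ValueError when length, window_size or a given stride is ≤ 0)
def Pre_get_sw_slices (length : Int) (window_size : Int) (stride : Option Int) (drop_last : Bool) (adjust_last : Bool) : Prop :=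
  0 < length ∧ 0 < window_size ∧ 0 < stride.getD 1
instance (length : Int) (window_size : Int) (stride : Option Int) (drop_last : Bool) (adjust_last : Bool) : Decidable (Pre_get_sw_slices length window_size stride drop_last adjust_last) := by unfold Pre_get_sw_slices; infer_instance

def pvWitness_get_sw_slices : Int × Int × Option Int × Bool × Bool := (10, 4, some 3, false, true)

def Spec_get_sw_slices (length : Int) (window_size : Int) (stride : Option Int) (drop_last : Bool) (adjust_last : Bool) (out : List (Int × Int)) : Prop := out = get_sw_slices_alt length window_size stride drop_last adjust_last
instance (length : Int) (window_size : Int) (stride : Option Int) (drop_last : Bool) (adjust_last : Bool) (out : List (Int × Int)) : Decidable (Spec_get_sw_slices length window_size stride drop_last adjust_last out) := by unfold Spec_get_sw_slices; infer_instance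

-- ===== CLAIM (what is proved, stated in full; the proofs are below) =====
def Claim_equal_get_sw_slices : Prop := ∀ (length : Int) (window_size : Int) (stride : Option Int) (drop_last : Bool) (adjust_last : Bool), Dom_get_sw_slices length window_size stride drop_last adjust_last → Pre_get_sw_slices length window_size stride drop_last adjust_last → Spec_get_sw_slices length window_size stride drop_last adjust_last (get_sw_slices length window_size stride drop_last adjust_last)

-- ===== LEMMAS AND PROOFS =====

-- B's window count, as a function (definitionally the `k` of get_sw_slices_alt)
def kOf (L w s : Int) : Int := if L ≤ w then 0 else -(PySem.Int.floordiv (-(L - w)) s)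

-- B's boundary part
def bTail (L w s k : Int) (dl al : Bool) : List (Int × Int) :=
  if k * s + w = L then [(k * s, k * s + w)]
  else if !dl then [((if al then max 0 (L - w) else k * s), L)]
  else []

lemma b_shape (L w s k : Int) (dl al : Bool) (sl : List (Int × Int)) :
    (if k * s + w = L then sl ++ [(k * s, k * s + w)]
     else if !dl then sl ++ [((if al then max 0 (L - w) else k * s), L)]
     else sl)
    = sl ++ bTail L w s k dl al := by
  unfold bTail; split_ifs <;> simp

lemma kOf_facts (L w s : Int) (hL : 0 < L) (hw : 0 < w) (hs : 0 < s) :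
    0 ≤ kOf L w s ∧ (∀ i : Int, 0 ≤ i → i < kOf L w s → i * s + w < L) ∧
      L ≤ kOf L w s * s + w ∧ kOf L w s ≤ L := by
  unfold kOf
  split_ifs with hlw
  · refine ⟨le_refl 0, fun i hi0 hik => absurd (lt_of_le_of_lt hi0 hik) (lt_irrefl 0), by omega, by omega⟩
  · set q := -(PySem.Int.floordiv (-(L - w)) s) with hq_def
    have hq : (q - 1) * s < L - w ∧ L - w ≤ q * s :=
      (PySem.Int.neg_floordiv_neg_eq_iff_of_pos hs).mp hq_def.symm
    have hq1 : 1 ≤ q := by nlinarith [hq.2]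
    refine ⟨by omega, ?_, by nlinarith [hq.2], ?_⟩
    · intro i hi0 hik
      have h1 : i * s ≤ (q - 1) * s := by nlinarith
      nlinarith [hq.1]
    · nlinarith [hq.1]

lemma aLoop_stop (L w s : Int) (dl al : Bool) (n : Nat) (acc : List (Int × Int)) (mi pm : Int)
    (h : ¬ pm < L) (hn : 0 < n) : aLoop L w s dl al n acc mi pm = acc := by
  cases n with
  | zero => omega
  | succ m => simp [aLoop, h]

lemma key (L w s : Int) (dl al : Bool) (k : Int)
    (hub : ∀ i : Int, 0 ≤ i → i < k → i * s + w < L) (hlb : L ≤ k * s + w) :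
    ∀ (n : Nat) (i : Int) (acc : List (Int × Int)) (pm : Int),
      0 ≤ i → i ≤ k → (k - i).toNat + 2 ≤ n → pm < L →
      aLoop L w s dl al n acc (i * s) pm
        = acc ++ ((PySem.List.pyRange i k).map (fun j => (j * s, j * s + w)) ++ bTail L w s k dl al) := by
  intro n
  induction n with
  | zero => intro i acc pm _ _ hfuel _; omega
  | succ n ih =>
    intro i acc pm hi0 hik hfuel hpm
    simp only [aLoop]
    rw [if_pos hpm]
    by_cases hik' : i < k
    · have hlt : i * s + w < L := hub i hi0 hik'
      rw [if_neg (by omega : ¬ L < i * s + w)]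
      have harg : i * s + s = (i + 1) * s := by ring
      rw [harg, ih (i + 1) (acc ++ [(i * s, i * s + w)]) (i * s + w) (by omega) (by omega)
        (by omega) hlt]
      rw [PySem.List.pyRange_one_cons hik']
      simp
    · have hieq : i = k := by omega
      subst hieq
      rw [PySem.List.pyRange_one_eq_nil (le_refl i)]
      by_cases heq : i * s + w = L
      · rw [if_neg (by omega : ¬ L < i * s + w)]
        rw [aLoop_stop L w s dl al n (acc ++ [(i * s, i * s + w)]) (i * s + s) (i * s + w)
          (by omega) (by omega)]
        unfold bTail
        rw [if_pos heq]
        simp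
      · have hgt : L < i * s + w := by omega
        rw [if_pos hgt]
        cases dl with
        | false =>
          rw [if_pos (by simp : (!false) = true)]
          rw [aLoop_stop L w s false al n
            (acc ++ [((if al = true then max 0 (L - w) else i * s), L)])
            ((if al = true then max 0 (L - w) else i * s) + s) L (lt_irrefl L) (by omega)]
          unfold bTail
          rw [if_neg heq]
          simp
        | true =>
          rw [if_neg (by simp : ¬ (!true) = true)]
          rw [aLoop_stop L w s true al n acc (i * s + s) (i * s + w) (by omega) (by omega)]
          unfold bTail
          rw [if_neg heq]
          simp

lemma main_eq (L w s : Int) (dl al : Bool) (hL : 0 < L) (hw : 0 < w) (hs : 0 < s) :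
    aLoop L w s dl al (L.toNat + 2) [] 0 0
      = (PySem.List.pyRange 0 (kOf L w s)).map (fun j => (j * s, j * s + w))
          ++ bTail L w s (kOf L w s) dl al := by
  obtain ⟨hk0, hub, hlb, hkL⟩ := kOf_facts L w s hL hw hs
  have := key L w s dl al (kOf L w s) hub hlb (L.toNat + 2) 0 [] 0
    (le_refl 0) hk0 (by omega) hL
  simpa using this

-- ===== VERDICT (by name: the statement is the Claim_ definition above) =====
theorem get_sw_slices_spec : Claim_equal_get_sw_slices := by
  intro L w stride dl al _ hpre
  obtain ⟨hL, hw, hstr⟩ := hpre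
  unfold Spec_get_sw_slices get_sw_slices get_sw_slices_alt
  cases stride with
  | none =>
    simp only
    rw [b_shape L w w (if L ≤ w then 0 else -(PySem.Int.floordiv (-(L - w)) w)) dl al]
    rw [show (if L ≤ w then (0:Int) else -(PySem.Int.floordiv (-(L - w)) w)) = kOf L w w from rfl]
    exact main_eq L w w dl al hL hw hw
  | some v =>
    have hv : 0 < v := hstr
    simp only [if_neg (by omega : ¬ v = 0)]
    rw [b_shape L w v (if L ≤ w then 0 else -(PySem.Int.floordiv (-(L - w)) v)) dl al]
    rw [show (if L ≤ w then (0:Int) else -(PySem.Int.floordiv (-(L - w)) v)) = kOf L w v from rfl]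
    exact main_eq L w v dl al hL hw hv
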